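-- pv_equiv track=rewrite | github.com/seungh0/programmers-algorithm | 20210509/two.py | solution
-- ===== SOURCE A (Python) =====
-- def solution(t, r):
--     result = []
--     number = 0
--
--     waiters = []
--     for id, (time, priority) in enumerate(zip(t, r)):
--         waiters.append((time, priority, id))
--     waiters = sorted(waiters, key=lambda x: (x[1], x[0], x[2]))
--
--     while waiters:
--         for waiter in waiters:
--             time, priority, id = waiter
--             if time <= number:
--                 waiters.remove(waiter)
--                 result.append(id)
--                 break
--         number += 1
--     return result
-- ===== SOURCE B (Python) =====
-- def solution(t, r):
--     items = [(time, prio, i) for i, (time, prio) in enumerate(zip(t, r))]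
--     result = []
--     clock = 0
--     while items:
--         if all(x[0] > clock for x in items):
--             clock = min(x[0] for x in items)
--         avail = [x for x in items if x[0] <= clock]
--         best = min(avail, key=lambda x: (x[1], x[0]))
--         items.remove(best)
--         result.append(best[2])
--         clock += 1
--     return result
-- ===== Notes on version B (the rewrite author's own statement) =====
-- stated objective: alternative
-- what changed: B drops A's sort and per-tick rescans of the sorted list: it keeps the jobs unsorted, picks each served job directly as the min over the released ones under the Python key (priority, time), and jumps the clock to the next release time instead of ticking one by one.
import Mathlib
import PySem

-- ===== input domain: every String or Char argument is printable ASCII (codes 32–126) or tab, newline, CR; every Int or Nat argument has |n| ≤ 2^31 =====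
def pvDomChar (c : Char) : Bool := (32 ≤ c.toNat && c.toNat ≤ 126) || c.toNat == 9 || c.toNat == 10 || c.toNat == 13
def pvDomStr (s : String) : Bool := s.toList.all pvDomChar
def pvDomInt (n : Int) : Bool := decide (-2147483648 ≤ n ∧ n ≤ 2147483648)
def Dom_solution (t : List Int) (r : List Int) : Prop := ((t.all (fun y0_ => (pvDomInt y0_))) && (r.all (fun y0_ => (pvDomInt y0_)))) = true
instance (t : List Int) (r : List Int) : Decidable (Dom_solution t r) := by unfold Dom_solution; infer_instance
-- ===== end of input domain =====

-- ===== PORT A =====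
-- B replaces A's sort + per-tick rescans by a direct minimum pick with a clock jump over idle ticks.
-- helper for loopA's termination measure only (A's loop ticks one by one up to the next release time)
def minRelease : List (Int × Int × Int) → Int
  | [] => 0
  | w :: rest => rest.foldl (fun m x => min m x.1) w.1

theorem lt_minRelease {n : Int} (ws : List (Int × Int × Int)) (hne : ws ≠ [])
    (h : ∀ w ∈ ws, n < w.1) : n < minRelease ws := by
  match ws with
  | [] => exact absurd rfl hne
  | w :: rest =>
    have aux : ∀ (l : List (Int × Int × Int)) (acc : Int), n < acc → (∀ x ∈ l, n < x.1) →
        n < l.foldl (fun m x => min m x.1) acc := by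
      intro l
      induction l with
      | nil => intro acc hacc _; simpa using hacc
      | cons y ys ih =>
        intro acc hacc hl
        simp only [List.foldl_cons]
        exact ih _ (lt_min hacc (hl y (by simp))) (fun x hx => hl x (by simp [hx]))
    exact aux rest w.1 (h w (by simp)) (fun x hx => h x (by simp [hx]))

-- the 'while waiters:' loop of A: scan the key-sorted list for the first released waiter,
-- serve it (list.remove of the found element is List.erase: PySem.List.remove?_eq_some_erase),
-- and tick the clock by one whether or not anyone was served
def loopA (ws : List (Int × Int × Int)) (number : Int) (result : List Int) : List Int :=
  if hws : ws = [] then result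
  else
    match hf : ws.find? (fun w => decide (w.1 ≤ number)) with
    | some w => loopA (ws.erase w) (number + 1) (result ++ [w.2.2])
    | none => loopA ws (number + 1) result
termination_by (ws.length, (minRelease ws - number).toNat)
decreasing_by
  · have hw := List.mem_of_find?_eq_some hf
    have h1 : (ws.erase w).length < ws.length := by
      have h2 := List.length_erase_of_mem hw
      have h3 : 0 < ws.length := List.length_pos_of_mem hw
      omega
    exact Prod.Lex.left _ _ h1
  · apply Prod.Lex.right
    have hall := List.find?_eq_none.mp hf
    have hlt : number < minRelease ws := by
      apply lt_minRelease ws hws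
      intro w hw
      have h4 := hall w hw
      simp at h4
      omega
    omega

def solution (t : List Int) (r : List Int) : List Int :=
  -- waiters built by the for-loop with append
  let waiters := (PySem.List.enumerate (t.zip r)).foldl
      (fun acc p => acc ++ [(p.2.1, p.2.2, p.1)]) []
  -- sorted(waiters, key=lambda x: (x[1], x[0], x[2])): ported as the stable sorted2 on (x[1], x[0]);
  -- the third tiebreak x[2] is unreachable because waiters lists its distinct ids x[2] in increasing
  -- order and the sort is stable, so ties in (x[1], x[0]) already stand in x[2] order
  let sortedWaiters := PySem.List.sorted2 waiters (fun x => x.2.1) (fun x => x.1)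
  loopA sortedWaiters 0 []

-- ===== PORT B =====
-- the strict boolean comparison that Python's tuple key (x[1], x[0]) induces (used by min2?)
def blt (a b : Int × Int × Int) : Bool :=
  decide (a.2.1 < b.2.1) || (!decide (b.2.1 < a.2.1) && decide (a.1 < b.1))

-- the running-minimum step of Python's min (Option accumulator as in min2?, and its plain form)
def optStep (acc : Option (Int × Int × Int)) (y : Int × Int × Int) : Option (Int × Int × Int) :=
  match acc with
  | none => some y
  | some c => if blt y c then some y else some c

theorem min2?_eq (xs : List (Int × Int × Int)) :
    PySem.List.min2? xs (fun x => x.2.1) (fun x => x.1) = xs.foldl optStep none := by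
  unfold PySem.List.min2? optStep blt
  congr 1
  funext acc x
  cases acc <;> rfl

theorem foldl_optStep_mem : ∀ (l : List (Int × Int × Int)) (acc : Option (Int × Int × Int))
    (m : Int × Int × Int), l.foldl optStep acc = some m → m ∈ l ∨ acc = some m := by
  intro l
  induction l with
  | nil => intro acc m h; right; simpa using h
  | cons y ys ih =>
    intro acc m h
    simp only [List.foldl_cons] at h
    rcases acc with _ | c
    · simp only [optStep] at h
      rcases ih _ _ h with h1 | h1
      · exact Or.inl (List.mem_cons_of_mem _ h1)
      · rw [Option.some.injEq] at h1
        exact Or.inl (by simp [← h1])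
    · simp only [optStep] at h
      by_cases hb : blt y c = true
      · rw [if_pos hb] at h
        rcases ih _ _ h with h1 | h1
        · exact Or.inl (List.mem_cons_of_mem _ h1)
        · rw [Option.some.injEq] at h1
          exact Or.inl (by simp [← h1])
      · rw [if_neg hb] at h
        rcases ih _ _ h with h1 | h1
        · exact Or.inl (List.mem_cons_of_mem _ h1)
        · exact Or.inr h1

-- (termination helper for loopB) whatever Python's min returns is in the list
theorem min2?_mem' {xs : List (Int × Int × Int)} {m : Int × Int × Int}
    (h : PySem.List.min2? xs (fun x => x.2.1) (fun x => x.1) = some m) : m ∈ xs := by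
  rw [min2?_eq] at h
  rcases foldl_optStep_mem xs none m h with h1 | h1
  · exact h1
  · cases h1

-- 'if all(x[0] > clock for x in items): clock = min(x[0] for x in items)' — the clock update of B
def clkB (items : List (Int × Int × Int)) (clock : Int) : Int :=
  if items.all (fun x => decide (clock < x.1))
  then (PySem.List.min? (items.map (fun x => x.1)) (fun v => v)).getD 0
  else clock

-- the 'while items:' loop of B: update the clock, pick the minimum-(priority, time) released job
-- (min with a tuple key = min2?; avail is the filter; list.remove of the minimum is List.erase)
def loopB (items : List (Int × Int × Int)) (clock : Int) (result : List Int) : List Int :=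
  if hit : items = [] then result
  else
    match hm : PySem.List.min2? (items.filter (fun x => decide (x.1 ≤ clkB items clock)))
        (fun x => x.2.1) (fun x => x.1) with
    | some best => loopB (items.erase best) (clkB items clock + 1) (result ++ [best.2.2])
    | none => result   -- unreachable: the filter is nonempty there (Python's min never sees it)
termination_by items.length
decreasing_by
  have hbest : best ∈ items := (List.mem_filter.mp (min2?_mem' hm)).1
  have h1 := List.length_erase_of_mem hbest
  have h2 : 0 < items.length := List.length_pos_of_mem hbest
  omega

def solution_alt (t : List Int) (r : List Int) : List Int :=
  let items := (PySem.List.enumerate (t.zip r)).map (fun p => (p.2.1, p.2.2, p.1))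
  loopB items 0 []

-- ===== PRECONDITION & SPEC =====
def Spec_solution (t : List Int) (r : List Int) (out : List Int) : Prop := out = solution_alt t r
instance (t : List Int) (r : List Int) (out : List Int) : Decidable (Spec_solution t r out) := by unfold Spec_solution; infer_instance

-- ===== CLAIM (what is proved, stated in full; the proofs are below) =====
def Claim_equal_solution : Prop := ∀ (t : List Int) (r : List Int), Dom_solution t r → Spec_solution t r (solution t r)

-- ===== LEMMAS AND PROOFS =====

def selStep (m y : Int × Int × Int) : Int × Int × Int := if blt y m then y else m

theorem foldl_optStep_some (l : List (Int × Int × Int)) :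
    ∀ (c : Int × Int × Int), l.foldl optStep (some c) = some (l.foldl selStep c) := by
  induction l with
  | nil => intro c; rfl
  | cons y ys ih =>
    intro c
    simp only [List.foldl_cons, optStep, selStep]
    by_cases hb : blt y c = true
    · rw [if_pos hb, if_pos hb, ih]
    · rw [if_neg hb, if_neg hb, ih]

theorem min2?_cons_eq (x : Int × Int × Int) (xs : List (Int × Int × Int)) :
    PySem.List.min2? (x :: xs) (fun y => y.2.1) (fun y => y.1) =
      some (xs.foldl selStep x) := by
  rw [min2?_eq]
  simp only [List.foldl_cons, optStep]
  exact foldl_optStep_some xs x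

theorem blt_iff (a b : Int × Int × Int) :
    blt a b = true ↔ (a.2.1 < b.2.1 ∨ (a.2.1 = b.2.1 ∧ a.1 < b.1)) := by
  simp [blt]; omega

theorem blt_eq_false_iff (a b : Int × Int × Int) :
    blt a b = false ↔ ¬ (a.2.1 < b.2.1 ∨ (a.2.1 = b.2.1 ∧ a.1 < b.1)) := by
  rw [Bool.eq_false_iff, Ne, blt_iff]

-- the total strict order actually realised on A's sorted list: key order, ties by id
def full (a b : Int × Int × Int) : Prop :=
  blt a b = true ∨ (blt b a = false ∧ a.2.2 < b.2.2)

theorem full_iff (a b : Int × Int × Int) :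
    full a b ↔ (a.2.1 < b.2.1 ∨ (a.2.1 = b.2.1 ∧ a.1 < b.1) ∨
      (a.2.1 = b.2.1 ∧ a.1 = b.1 ∧ a.2.2 < b.2.2)) := by
  unfold full
  rw [blt_iff, blt_eq_false_iff]
  constructor <;> intro h <;> omega

theorem full_asymm {a b : Int × Int × Int} (h1 : full a b) (h2 : full b a) : False := by
  rw [full_iff] at h1 h2; omega

theorem full_of_blt_of_full {x y z : Int × Int × Int} (h1 : blt x y = true) (h2 : full y z) :
    full x z := by
  rw [blt_iff] at h1; rw [full_iff] at h2 ⊢; omega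

theorem full_of_full_of_blt {r y x : Int × Int × Int} (h1 : full r y) (h2 : blt y x = true) :
    full r x := by
  rw [full_iff] at h1 ⊢; rw [blt_iff] at h2; omega

theorem full_of_full_of_nblt {r x y : Int × Int × Int} (h1 : full r x) (h2 : blt y x = false)
    (h3 : x.2.2 < y.2.2) : full r y := by
  rw [full_iff] at h1 ⊢; rw [blt_eq_false_iff] at h2; omega

def idlt (a b : Int × Int × Int) : Prop := a.2.2 < b.2.2

-- stability of the insertion sort: inserting a later (larger-id) element keeps the list
-- pairwise `full` (key order with ties in id order)
theorem insertBy_pairwise_full (x : Int × Int × Int) (acc : List (Int × Int × Int))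
    (hacc : acc.Pairwise full) (hid : ∀ y ∈ acc, y.2.2 < x.2.2) :
    (PySem.List.insertBy blt x acc).Pairwise full := by
  induction acc with
  | nil => simp [PySem.List.insertBy]
  | cons y ys ih =>
    rw [List.pairwise_cons] at hacc
    by_cases hby : blt x y = true
    · rw [show PySem.List.insertBy blt x (y :: ys) = x :: y :: ys from by
        simp [PySem.List.insertBy, hby]]
      rw [List.pairwise_cons]
      refine ⟨?_, List.pairwise_cons.mpr hacc⟩
      intro z hz
      rcases List.mem_cons.mp hz with rfl | hz2
      · exact Or.inl hby
      · exact full_of_blt_of_full hby (hacc.1 z hz2)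
    · have hby' : blt x y = false := by
        cases h : blt x y
        · rfl
        · exact absurd h hby
      rw [show PySem.List.insertBy blt x (y :: ys) = y :: PySem.List.insertBy blt x ys from by
        simp [PySem.List.insertBy, hby']]
      rw [List.pairwise_cons]
      constructor
      · intro z hz
        rw [PySem.List.mem_insertBy] at hz
        rcases hz with rfl | hz2
        · exact Or.inr ⟨hby', hid y (by simp)⟩
        · exact hacc.1 z hz2
      · exact ih hacc.2 (fun z hz => hid z (by simp [hz]))

theorem sorted2_pairwise_full (xs : List (Int × Int × Int)) (hxs : xs.Pairwise idlt) :
    (PySem.List.sorted2 xs (fun x => x.2.1) (fun x => x.1)).Pairwise full := by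
  have hrepr : PySem.List.sorted2 xs (fun x => x.2.1) (fun x => x.1) =
      xs.foldl (fun acc x => PySem.List.insertBy blt x acc) [] := rfl
  rw [hrepr]
  have aux : ∀ (l : List (Int × Int × Int)) (acc : List (Int × Int × Int)),
      acc.Pairwise full → (∀ y ∈ acc, ∀ x ∈ l, y.2.2 < x.2.2) → l.Pairwise idlt →
      (l.foldl (fun acc x => PySem.List.insertBy blt x acc) acc).Pairwise full := by
    intro l
    induction l with
    | nil => intro acc h _ _; simpa using h
    | cons x xs ih =>
      intro acc hacc hcross hl
      simp only [List.foldl_cons]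
      apply ih
      · exact insertBy_pairwise_full x acc hacc (fun y hy => hcross y hy x (by simp))
      · intro y hy z hz
        rw [PySem.List.mem_insertBy] at hy
        rcases hy with rfl | hy2
        · exact (List.pairwise_cons.mp hl).1 z hz
        · exact hcross y hy2 z (by simp [hz])
      · exact (List.pairwise_cons.mp hl).2
  exact aux xs [] (by simp) (by simp) hxs

-- the running minimum of Python's min on an id-increasing list is the unique `full`-minimum
theorem foldl_selStep_spec : ∀ (l : List (Int × Int × Int)) (c : Int × Int × Int),
    (c :: l).Pairwise idlt →
    (l.foldl selStep c ∈ c :: l ∧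
      ∀ y ∈ c :: l, y ≠ l.foldl selStep c → full (l.foldl selStep c) y) := by
  intro l
  induction l with
  | nil =>
    intro c _
    refine ⟨by simp, ?_⟩
    intro y hy hne
    simp only [List.foldl_nil] at hne ⊢
    rcases List.mem_cons.mp hy with rfl | h
    · exact absurd rfl hne
    · cases h
  | cons y ys ih =>
    intro c hpw
    have hcy : idlt c y := (List.pairwise_cons.mp hpw).1 y (by simp)
    have hpw' : ((selStep c y) :: ys).Pairwise idlt := by
      rw [List.pairwise_cons]
      constructor
      · intro w hw
        unfold selStep
        split
        · exact (List.pairwise_cons.mp (List.pairwise_cons.mp hpw).2).1 w hw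
        · exact (List.pairwise_cons.mp hpw).1 w (by simp [hw])
      · exact (List.pairwise_cons.mp (List.pairwise_cons.mp hpw).2).2
    obtain ⟨hmem, hmin⟩ := ih (selStep c y) hpw'
    have hz : selStep c y = y ∨ selStep c y = c := by
      unfold selStep; split
      · exact Or.inl rfl
      · exact Or.inr rfl
    simp only [List.foldl_cons]
    constructor
    · rcases List.mem_cons.mp hmem with h | h
      · rcases hz with hz | hz <;> rw [h, hz] <;> simp
      · simp [h]
    · intro w hw hne
      rcases List.mem_cons.mp hw with heq | hw2
      · -- w = c
        subst w
        by_cases hbyc : blt y c = true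
        · have hz' : selStep c y = y := by unfold selStep; rw [if_pos hbyc]
          by_cases hry : ys.foldl selStep (selStep c y) = y
          · rw [hry]; exact Or.inl hbyc
          · have h1 : full (ys.foldl selStep (selStep c y)) y :=
              hmin y (by rw [hz']; simp) (fun hh => hry hh.symm)
            exact full_of_full_of_blt h1 hbyc
        · have hbyc' : blt y c = false := by
            cases h : blt y c
            · rfl
            · exact absurd h hbyc
          have hz' : selStep c y = c := by unfold selStep; rw [if_neg hbyc]
          exact hmin c (by rw [hz']; simp) hne
      · rcases List.mem_cons.mp hw2 with heq | hw3
        · -- w = y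
          subst w
          by_cases hbyc : blt y c = true
          · have hz' : selStep c y = y := by unfold selStep; rw [if_pos hbyc]
            exact hmin y (by rw [hz']; simp) hne
          · have hbyc' : blt y c = false := by
              cases h : blt y c
              · rfl
              · exact absurd h hbyc
            have hz' : selStep c y = c := by unfold selStep; rw [if_neg hbyc]
            by_cases hrc : ys.foldl selStep (selStep c y) = c
            · rw [hrc]
              exact Or.inr ⟨hbyc', hcy⟩
            · have h1 : full (ys.foldl selStep (selStep c y)) c :=
                hmin c (by rw [hz']; simp) (fun hh => hrc hh.symm)
              exact full_of_full_of_nblt h1 hbyc' hcy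
        · exact hmin w (by simp [hw3]) hne

theorem min2?_full (xs : List (Int × Int × Int)) (hxs : xs.Pairwise idlt)
    (m : Int × Int × Int)
    (hm : PySem.List.min2? xs (fun x => x.2.1) (fun x => x.1) = some m) :
    m ∈ xs ∧ ∀ y ∈ xs, y ≠ m → full m y := by
  match xs, hxs with
  | [], _ => rw [min2?_eq] at hm; cases hm
  | x :: xs', hxs =>
    rw [min2?_cons_eq] at hm
    rw [Option.some.injEq] at hm
    subst hm
    exact foldl_selStep_spec xs' x hxs

-- on a `full`-sorted list, the first released waiter is the `full`-minimum of the released ones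
theorem find?_full_spec (ws : List (Int × Int × Int)) (hws : ws.Pairwise full) (n : Int)
    (w : Int × Int × Int) (hf : ws.find? (fun x => decide (x.1 ≤ n)) = some w) :
    w ∈ ws ∧ w.1 ≤ n ∧ ∀ y ∈ ws, y.1 ≤ n → y ≠ w → full w y := by
  induction ws with
  | nil => cases hf
  | cons x xs ih =>
    rw [List.pairwise_cons] at hws
    by_cases hx : decide (x.1 ≤ n) = true
    · rw [List.find?_cons_of_pos (p := fun (y : Int × Int × Int) => decide (y.1 ≤ n)) hx] at hf
      rw [Option.some.injEq] at hf
      subst hf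
      refine ⟨by simp, by simpa using hx, ?_⟩
      intro y hy _ hne
      rcases List.mem_cons.mp hy with rfl | hy2
      · exact absurd rfl hne
      · exact hws.1 y hy2
    · rw [List.find?_cons_of_neg (p := fun (y : Int × Int × Int) => decide (y.1 ≤ n)) (by simpa using hx)] at hf
      obtain ⟨h1, h2, h3⟩ := ih hws.2 hf
      refine ⟨by simp [h1], h2, ?_⟩
      intro y hy hyn hne
      rcases List.mem_cons.mp hy with rfl | hy2
      · simp at hx; omega
      · exact h3 y hy2 hyn hne

-- loop-step equations of loopA
theorem loopA_nil (n : Int) (res : List Int) : loopA [] n res = res := by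
  rw [loopA, dif_pos rfl]

theorem loopA_serve (ws : List (Int × Int × Int)) (n : Int) (res : List Int)
    (w : Int × Int × Int) (hne : ws ≠ [])
    (hf : ws.find? (fun x => decide (x.1 ≤ n)) = some w) :
    loopA ws n res = loopA (ws.erase w) (n + 1) (res ++ [w.2.2]) := by
  rw [loopA]
  rw [dif_neg hne]
  split
  · rename_i w' h'
    rw [h'] at hf
    rw [Option.some.injEq] at hf
    rw [hf]
  · rename_i h'
    rw [h'] at hf
    cases hf

theorem loopA_tick (ws : List (Int × Int × Int)) (n : Int) (res : List Int) (hne : ws ≠ [])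
    (hf : ws.find? (fun x => decide (x.1 ≤ n)) = none) :
    loopA ws n res = loopA ws (n + 1) res := by
  rw [loopA]
  rw [dif_neg hne]
  split
  · rename_i w' h'
    rw [h'] at hf
    cases hf
  · rfl

-- loop-step equations of loopB
theorem loopB_nil (c : Int) (res : List Int) : loopB [] c res = res := by
  rw [loopB, dif_pos rfl]

theorem loopB_serve (items : List (Int × Int × Int)) (c : Int) (res : List Int)
    (best : Int × Int × Int) (hne : items ≠ [])
    (hm : PySem.List.min2? (items.filter (fun x => decide (x.1 ≤ clkB items c)))
        (fun x => x.2.1) (fun x => x.1) = some best) :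
    loopB items c res = loopB (items.erase best) (clkB items c + 1) (res ++ [best.2.2]) := by
  rw [loopB]
  rw [dif_neg hne]
  split
  · rename_i w' h'
    rw [h'] at hm
    rw [Option.some.injEq] at hm
    rw [hm]
  · rename_i h'
    rw [h'] at hm
    cases hm

-- A only ticks while nobody is released: the clock can jump
theorem loopA_idle (ws : List (Int × Int × Int)) (res : List Int) :
    ∀ (j : Nat) (n : Int), (∀ x ∈ ws, n + j ≤ x.1) → loopA ws n res = loopA ws (n + j) res := by
  intro j
  induction j with
  | zero => intro n _; norm_num
  | succ j ihj =>
    intro n h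
    have hstep : loopA ws n res = loopA ws (n + 1) res := by
      by_cases hws : ws = []
      · subst hws; rw [loopA_nil, loopA_nil]
      · refine loopA_tick ws n res hws (List.find?_eq_none.mpr ?_)
        intro x hx
        have h1 := h x hx
        simp only [decide_eq_true_eq]
        push_cast at h1
        omega
    rw [hstep]
    have h2 : ∀ x ∈ ws, (n + 1) + (j : Int) ≤ x.1 := by
      intro x hx
      have h1 := h x hx
      push_cast at h1 ⊢
      omega
    rw [ihj (n + 1) h2]
    have harith : (n + 1) + (j : Int) = n + ((j : Nat) + 1 : Nat) := by push_cast; ring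
    rw [harith]

-- at any clock, A's scan of its sorted list and B's min over the released jobs pick the same job
theorem pick_eq (ws items : List (Int × Int × Int)) (n : Int) (w m : Int × Int × Int)
    (hpw : ws.Pairwise full) (hperm : items.Perm ws) (hid : items.Pairwise idlt)
    (hf : ws.find? (fun x => decide (x.1 ≤ n)) = some w)
    (hm : PySem.List.min2? (items.filter (fun x => decide (x.1 ≤ n)))
        (fun x => x.2.1) (fun x => x.1) = some m) : w = m := by
  obtain ⟨hwmem, hwle, hwmin⟩ := find?_full_spec ws hpw n w hf
  obtain ⟨hmmem, hmmin⟩ := min2?_full _ (List.Pairwise.sublist List.filter_sublist hid) m hm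
  have hmitems : m ∈ items := (List.mem_filter.mp hmmem).1
  have hmle : m.1 ≤ n := by
    have h1 := (List.mem_filter.mp hmmem).2
    simpa using h1
  have hmws : m ∈ ws := hperm.mem_iff.mp hmitems
  have hwitems : w ∈ items := hperm.mem_iff.mpr hwmem
  have hwavail : w ∈ items.filter (fun x => decide (x.1 ≤ n)) :=
    List.mem_filter.mpr ⟨hwitems, by simpa using hwle⟩
  by_contra hne
  exact full_asymm (hwmin m hmws hmle (fun h => hne h.symm)) (hmmin w hwavail hne)

theorem loopA_loopB (n : Nat) : ∀ (ws items : List (Int × Int × Int)) (clock : Int)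
    (res : List Int), ws.length ≤ n → ws.Pairwise full → items.Perm ws → items.Pairwise idlt →
    loopA ws clock res = loopB items clock res := by
  induction n with
  | zero =>
    intro ws items c res hlen _ hperm _
    have hws : ws = [] := List.eq_nil_of_length_eq_zero (by omega)
    subst hws
    have hit : items = [] := List.perm_nil.mp hperm
    subst hit
    rw [loopA_nil, loopB_nil]
  | succ n ih =>
    intro ws items c res hlen hpw hperm hid
    by_cases hws : ws = []
    · subst hws
      have hit : items = [] := List.perm_nil.mp hperm
      subst hit
      rw [loopA_nil, loopB_nil]
    · have hit : items ≠ [] := by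
        intro h
        subst h
        exact hws (List.perm_nil.mp hperm.symm)
      -- common continuation: once the clock stands at c' with somebody released, both serve
      -- the same job and recurse
      have key : ∀ c' : Int, clkB items c = c' → (∃ x ∈ items, x.1 ≤ c') →
          loopA ws c' res = loopB items c res := by
        rintro c' hck ⟨x, hxmem, hxle⟩
        have hxws : x ∈ ws := hperm.mem_iff.mp hxmem
        have hfind : (ws.find? (fun y => decide (y.1 ≤ c'))).isSome :=
          List.find?_isSome.mpr ⟨x, hxws, by simpa using hxle⟩
        obtain ⟨w, hf⟩ := Option.isSome_iff_exists.mp hfind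
        have hxavail : x ∈ items.filter (fun y => decide (y.1 ≤ c')) :=
          List.mem_filter.mpr ⟨hxmem, by simpa using hxle⟩
        obtain ⟨m, hm⟩ : ∃ m, PySem.List.min2? (items.filter (fun y => decide (y.1 ≤ c')))
            (fun y => y.2.1) (fun y => y.1) = some m := by
          cases hflt : items.filter (fun y => decide (y.1 ≤ c')) with
          | nil => rw [hflt] at hxavail; cases hxavail
          | cons z zs => exact ⟨zs.foldl selStep z, min2?_cons_eq z zs⟩
        have hwm : w = m := pick_eq ws items c' w m hpw hperm hid hf hm
        subst hwm
        rw [loopA_serve ws c' res w hws hf]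
        rw [loopB_serve items c res w hit (by rw [hck]; exact hm)]
        rw [hck]
        have hwws : w ∈ ws := List.mem_of_find?_eq_some hf
        apply ih
        · have h1 := List.length_erase_of_mem hwws
          have h2 : 0 < ws.length := List.length_pos_of_mem hwws
          omega
        · exact List.Pairwise.sublist (List.erase_sublist ..) hpw
        · exact hperm.erase w
        · exact List.Pairwise.sublist (List.erase_sublist ..) hid
      cases hall : items.all (fun x => decide (c < x.1)) with
      | false =>
        have hc' : clkB items c = c := by
          unfold clkB
          rw [hall]
          rfl
        obtain ⟨x, hx, hxc⟩ : ∃ x ∈ items, ¬ (decide (c < x.1) = true) := by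
          by_contra hcon
          have hcon2 : ∀ x ∈ items, decide (c < x.1) = true := by
            intro x hx
            by_contra h2
            exact hcon ⟨x, hx, h2⟩
          rw [← List.all_eq_true] at hcon2
          rw [hall] at hcon2
          cases hcon2
        exact key c hc' ⟨x, hx, by simp at hxc; omega⟩
      | true =>
        have hallp : ∀ x ∈ items, c < x.1 := by
          intro x hx
          have h1 := List.all_eq_true.mp hall x hx
          simpa using h1
        obtain ⟨v, hv⟩ : ∃ v, PySem.List.min? (items.map (fun x => x.1)) (fun u => u) = some v := by
          cases hkm : PySem.List.min? (items.map (fun x => x.1)) (fun u => u) with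
          | none =>
            rw [PySem.List.min?_eq_none_iff] at hkm
            rw [List.map_eq_nil_iff] at hkm
            exact absurd hkm hit
          | some v => exact ⟨v, rfl⟩
        have hc' : clkB items c = v := by
          unfold clkB
          rw [hall, hv]
          rfl
        have hvmin : ∀ y ∈ items, v ≤ y.1 := by
          intro y hy
          exact PySem.List.min?_isMin hv y.1 (List.mem_map_of_mem hy)
        obtain ⟨x, hx, hxv⟩ : ∃ x ∈ items, x.1 = v := by
          obtain ⟨x, hx, hxv⟩ := List.mem_map.mp (PySem.List.min?_mem hv)
          exact ⟨x, hx, hxv⟩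
        have hidle : loopA ws c res = loopA ws v res := by
          have hcv : c < v := by
            have h1 := hallp x hx
            omega
          have hall2 : ∀ y ∈ ws, c + ((v - c).toNat : Int) ≤ y.1 := by
            intro y hy
            have h1 := hvmin y (hperm.mem_iff.mpr hy)
            omega
          rw [loopA_idle ws res (v - c).toNat c hall2]
          have harith : c + ((v - c).toNat : Int) = v := by omega
          rw [harith]
        rw [hidle]
        exact key v hc' ⟨x, hx, le_of_eq hxv⟩

-- the ids in the waiter list are its enumerate indices, strictly increasing
theorem enum_pairwise (l : List (Int × Int)) :
    (((PySem.List.enumerate l 0)).map (fun p => (p.2.1, p.2.2, p.1))).Pairwise idlt := by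
  rw [List.pairwise_map]
  have h : ((PySem.List.enumerate l 0).map (fun p => p.1)).Pairwise (fun a b => a < b) := by
    rw [PySem.List.map_fst_enumerate]
    exact PySem.List.pairwise_lt_pyRange_one 0 (0 + l.length)
  rw [List.pairwise_map] at h
  exact h.imp (fun hab => hab)

-- ===== VERDICT (by name: the statement is the Claim_ definition above) =====
theorem solution_spec : Claim_equal_solution := by
  intro t r _
  unfold Spec_solution solution solution_alt
  simp only [PySem.List.foldl_append_singleton_eq_map, List.nil_append]
  apply loopA_loopB (PySem.List.sorted2 ((PySem.List.enumerate (t.zip r)).map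
      (fun p => (p.2.1, p.2.2, p.1))) (fun x => x.2.1) (fun x => x.1)).length
  · exact le_rfl
  · exact sorted2_pairwise_full _ (enum_pairwise _)
  · exact (PySem.List.sorted2_perm _ _ _ _).symm
  · exact enum_pairwise _
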